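-- pv_equiv track=rewrite | github.com/Kdelphinus/Python_study | Baekjoon/gold/gold V/17241_integral_of_a_polynomial_function.py | my_integral
-- ===== SOURCE A (Python) =====
-- def eq_split(eq: str) -> list:
--     """
--     방정식을 나누는 함수
--     Args:
--         eq: 문자열로 주어진 방정식
--
--     Returns:
--         result: 나뉘어진 방정식의 계수와 차수
--     """
--     s, e, result = 0, 0, list()
--     while e < len(eq):
--         while e < len(eq) and eq[e] != "x":
--             e += 1
--         result.append([int(eq[s:e])])
--         s = 0
--         while e < len(eq) and eq[e] == "x":
--             s += 1
--             e += 1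
--         result[-1].append(s)
--         s = e
--     return result
--
-- def my_integral(eq: str) -> str:
--     """
--     적분한 방정식을 반환하는 함수
--     Args:
--         eq: 주어진 방정식
--
--     Returns:
--         ans: 적분된 방정식
--     """
--     if eq == "0":
--         return "W"
--     ans, eq = "", eq_split(eq)
--     for c, r in eq:
--         c = c // (r + 1)
--         if ans and ans[-1] == "x" and c >= 0:
--             ans += "+"
--         if abs(c) != 1:
--             ans += str(c)
--         elif c == -1:
--             ans += "-"
--         ans += "x" * (r + 1)
--     ans += "+W"
--     return ans
-- ===== SOURCE B (Python) =====
-- def my_integral(eq: str) -> str: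
--     if eq == "0":
--         return "W"
--     segs = eq.split("x")
--     trailing = segs[-1] == ""
--     if trailing:
--         segs.pop()
--     terms = []
--     i, n = 0, len(segs)
--     while i < n:
--         c = int(segs[i])
--         j = i + 1
--         while j < n and segs[j] == "":
--             j += 1
--         r = (j - i) if (j < n or trailing) else 0
--         terms.append((c, r))
--         i = j
--     parts = []
--     for k, (c, r) in enumerate(terms):
--         c //= r + 1
--         if k and c >= 0:
--             parts.append("+")
--         if abs(c) != 1:
--             parts.append(str(c))
--         elif c == -1:
--             parts.append("-")
--         parts.append("x" * (r + 1))
--     parts.append("+W")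
--     return "".join(parts)
-- ===== Notes on version B (the rewrite author's own statement) =====
-- stated objective: idiomatic
-- what changed: B replaces A's hand-written two-pointer index scan (eq_split) with a single str.split('x') tokenization of the string, reading each term's coefficient and degree off the segment list, and builds the output as a joined list of term pieces instead of character-by-character string accumulation.
-- outside the precondition, e.g. on my_integral('x'): A raises ValueError, B raises ValueError
import Mathlib
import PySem

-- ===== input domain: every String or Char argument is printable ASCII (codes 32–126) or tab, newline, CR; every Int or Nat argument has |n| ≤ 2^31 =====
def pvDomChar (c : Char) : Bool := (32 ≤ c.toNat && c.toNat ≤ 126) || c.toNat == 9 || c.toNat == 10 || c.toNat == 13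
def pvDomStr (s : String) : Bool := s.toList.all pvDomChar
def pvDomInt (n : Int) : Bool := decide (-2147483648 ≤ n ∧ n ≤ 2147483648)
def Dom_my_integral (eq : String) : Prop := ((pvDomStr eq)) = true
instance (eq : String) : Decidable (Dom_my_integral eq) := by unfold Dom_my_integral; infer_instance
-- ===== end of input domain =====

-- B replaces A's hand-written two-pointer scanner with a split("x") tokenizer over the segment
-- list and builds the answer as a joined list of term pieces (objective: idiomatic; no speed claim).

-- ===== PORT A =====
-- termination helper for the outer while of eq_split (each iteration consumes ≥ 1 char)
theorem pvEqSplitDec (c : Char) (t : List Char) :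
    (((c :: t).dropWhile (fun a => a != 'x')).dropWhile (fun a => a == 'x')).length
      < (c :: t).length := by
  by_cases h : c = 'x'
  · subst h
    simp only [List.dropWhile_cons]
    simp only [bne_self_eq_false, Bool.false_eq_true, if_false, List.length_cons]
    exact Nat.lt_succ_of_le (List.length_dropWhile_le _ t)
  · simp only [List.dropWhile_cons, bne_iff_ne, ne_eq, h, not_false_eq_true, if_true,
      List.length_cons]
    exact Nat.lt_succ_of_le (le_trans (List.length_dropWhile_le _ _) (List.length_dropWhile_le _ t))

-- eq_split: the outer while walks the string; the two inner whiles are the two spans below;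
-- int(eq[s:e]) is PySem.Int.ofChars? (none exactly where Python raises ValueError)
def pvEqSplitA : List Char → Option (List (Int × Nat))
  | [] => some []
  | c :: t =>
    let cs := (c :: t).takeWhile (fun a => a != 'x')
    let rest := (c :: t).dropWhile (fun a => a != 'x')
    match PySem.Int.ofChars? cs with
    | none => none
    | some coeff =>
      let xs := rest.takeWhile (fun a => a == 'x')
      let rest' := rest.dropWhile (fun a => a == 'x')
      (pvEqSplitA rest').map (fun res => (coeff, xs.length) :: res)
  termination_by l => l.length
  decreasing_by exact pvEqSplitDec c t

-- the body of A's formatting for-loop; `ans and ans[-1] == "x"` is pyGet? ans (-1) == some 'x'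
-- (pyGet? is none exactly on the empty list, matching the short-circuit)
def pvStepA (ans : List Char) (t : Int × Nat) : List Char :=
  let c := PySem.Int.floordiv t.1 ((t.2 : Int) + 1)
  let ans := if PySem.List.pyGet? ans (-1) == some 'x' && decide (0 ≤ c) then ans ++ ['+'] else ans
  let ans := if |c| ≠ 1 then ans ++ PySem.Int.toChars c
             else if c = -1 then ans ++ ['-'] else ans
  ans ++ List.replicate (t.2 + 1) 'x'

def my_integral (eq : String) : String :=
  if eq == "0" then "W"
  else
    match pvEqSplitA eq.toList with
    | none => ""   -- the Python raises ValueError here; excluded by Pre_my_integral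
    | some terms => String.mk (terms.foldl pvStepA [] ++ ['+', 'W'])

-- ===== PORT B =====
-- Source B's term loop over the split segments: coefficient at i, the inner j-while skips the
-- empty segments, r as computed in Source B
def pvParseB (trailing : Bool) : List (List Char) → Option (List (Int × Nat))
  | [] => some []
  | s :: rest =>
    match PySem.Int.ofChars? s with
    | none => none
    | some c =>
      let empties := rest.takeWhile (fun u => u == ([] : List Char))
      let rest' := rest.dropWhile (fun u => u == ([] : List Char))
      let r := if !rest'.isEmpty || trailing then empties.length + 1 else 0
      (pvParseB trailing rest').map (fun res => (c, r) :: res)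
  termination_by l => l.length
  decreasing_by
    simp only [List.length_cons]
    exact Nat.lt_succ_of_le (List.length_dropWhile_le _ _)

-- the body of Source B's enumerate loop, carrying (parts, k)
def pvStepB (acc : List (List Char) × Nat) (t : Int × Nat) : List (List Char) × Nat :=
  let c := PySem.Int.floordiv t.1 ((t.2 : Int) + 1)
  let parts := if decide (acc.2 ≠ 0) && decide (0 ≤ c) then acc.1 ++ [['+']] else acc.1
  let parts := if |c| ≠ 1 then parts ++ [PySem.Int.toChars c]
               else if c = -1 then parts ++ [['-']] else parts
  (parts ++ [List.replicate (t.2 + 1) 'x'], acc.2 + 1)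

def my_integral_alt (eq : String) : String :=
  if eq == "0" then "W"
  else
    let segs := PySem.Chars.splitOn eq.toList ['x']
    let trailing := segs.getLast? == some []
    let segs := if trailing then segs.dropLast else segs
    match pvParseB trailing segs with
    | none => ""   -- Source B raises ValueError here; excluded by Pre_my_integral
    | some terms =>
      String.mk (PySem.Chars.join [] ((terms.foldl pvStepB ([], 0)).1 ++ [['+', 'W']]))

-- ===== PRECONDITION & SPEC =====
-- Pre_ excludes exactly the inputs on which the Python A raises ValueError: a non-empty string
-- whose first x-separated segment, or any non-empty later segment, is not a valid int() literal.
def Pre_my_integral (eq : String) : Prop :=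
  eq.toList = [] ∨
    ((PySem.Int.ofChars? ((PySem.Chars.splitOn eq.toList ['x']).headI)).isSome = true ∧
     ∀ s ∈ (PySem.Chars.splitOn eq.toList ['x']).tail,
       s = [] ∨ (PySem.Int.ofChars? s).isSome = true)
instance (eq : String) : Decidable (Pre_my_integral eq) := by unfold Pre_my_integral; infer_instance

def pvWitness_my_integral : String := "3xx-2x+1"

def Spec_my_integral (eq : String) (out : String) : Prop := out = my_integral_alt eq
instance (eq : String) (out : String) : Decidable (Spec_my_integral eq out) := by
  unfold Spec_my_integral; infer_instance

-- ===== CLAIM (what is proved, stated in full; the proofs are below) =====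
def Claim_equal_my_integral : Prop :=
  ∀ (eq : String), Dom_my_integral eq → Pre_my_integral eq → Spec_my_integral eq (my_integral eq)

-- ===== LEMMAS AND PROOFS =====

def pvSox : List Char → List (List Char)
  | [] => [[]]
  | c :: t =>
    if c = 'x' then [] :: pvSox t
    else
      match pvSox t with
      | [] => [[c]]
      | p :: ps => (c :: p) :: ps

theorem pvSox_ne_nil (l : List Char) : pvSox l ≠ [] := by
  cases l with
  | nil => simp [pvSox]
  | cons c t =>
    simp only [pvSox]
    split
    · simp
    · cases pvSox t <;> simp

def pvConsHead (pre : List Char) : List (List Char) → List (List Char)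
  | [] => [pre]
  | p :: ps => (pre ++ p) :: ps

theorem pvSplitOnGo_eq : ∀ (fuel : Nat) (l cur : List Char) (acc : List (List Char)),
    l.length < fuel →
    PySem.Chars.splitOn.go ['x'] fuel l cur acc = acc.reverse ++ pvConsHead cur.reverse (pvSox l) := by
  intro fuel
  induction fuel with
  | zero => intro l cur acc h; omega
  | succ f ih =>
    intro l cur acc h
    cases l with
    | nil =>
      rw [PySem.Chars.splitOn.go]
      · simp [pvSox, pvConsHead]
      · omega
    | cons c t =>
      rw [PySem.Chars.splitOn.go]
      by_cases hc : c = 'x'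
      · subst hc
        have hp : ['x'].isPrefixOf ('x' :: t) = true := by simp [List.isPrefixOf]
        rw [if_pos hp]
        rw [ih _ _ _ (by simpa using Nat.lt_of_succ_lt_succ h)]
        simp only [pvSox, pvConsHead]
        rcases hs : pvSox t with _ | ⟨p, ps⟩
        · exact absurd hs (pvSox_ne_nil t)
        · simp [hs]
      · have hp : ['x'].isPrefixOf (c :: t) = false := by
          simp [List.isPrefixOf]; exact fun hh => (hc hh.symm).elim
        rw [if_neg (by simp [hp])]
        rw [ih _ _ _ (by simpa using Nat.lt_of_succ_lt_succ h)]
        simp only [pvSox, if_neg hc]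
        rcases hs : pvSox t with _ | ⟨p, ps⟩
        · exact absurd hs (pvSox_ne_nil t)
        · simp [pvConsHead]

theorem pvSplitOn_eq_sox (l : List Char) : PySem.Chars.splitOn l ['x'] = pvSox l := by
  unfold PySem.Chars.splitOn
  rw [pvSplitOnGo_eq (l.length + 1) l [] [] (by omega)]
  rcases hs : pvSox l with _ | ⟨p, ps⟩
  · exact absurd hs (pvSox_ne_nil l)
  · simp [pvConsHead]

theorem pvSox_eq_span (l : List Char) :
    pvSox l =
      match l.dropWhile (fun a => a != 'x') with
      | [] => [l.takeWhile (fun a => a != 'x')]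
      | _ :: r2 => l.takeWhile (fun a => a != 'x') :: pvSox r2 := by
  induction l with
  | nil => simp [pvSox]
  | cons c t ih =>
    by_cases hc : c = 'x'
    · subst hc
      simp [pvSox]
    · simp only [pvSox, List.dropWhile_cons, List.takeWhile_cons,
        bne_iff_ne, ne_eq, hc, not_false_eq_true, if_true]
      rw [ih]
      rcases hd : t.dropWhile (fun a => a != 'x') with _ | ⟨d, r2⟩ <;> simp

theorem pvSox_replicate_append (m : Nat) (l : List Char) :
    pvSox (List.replicate m 'x' ++ l) = List.replicate m ([] : List Char) ++ pvSox l := by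
  induction m with
  | zero => simp
  | succ k ih => simp [List.replicate_succ, pvSox, ih]

def pvAltP (l : List Char) : Option (List (Int × Nat)) :=
  let segs := pvSox l
  let tr := segs.getLast? == some []
  pvParseB tr (if tr then segs.dropLast else segs)

theorem pvHeadDrop (p : Char → Bool) (l r : List Char) (d : Char)
    (h : l.dropWhile p = d :: r) : p d = false := by
  have w : List.dropWhile p l ≠ [] := by simp [h]
  have h2 := List.head_dropWhile_not p w
  have h3 : (List.dropWhile p l).head w = d := by simp [h]
  rwa [h3] at h2

theorem pvParse_eq : ∀ (l : List Char), pvEqSplitA l = pvAltP l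
  | [] => by simp [pvEqSplitA, pvAltP, pvSox, pvParseB]
  | c :: t => by
    rw [pvEqSplitA]
    dsimp only
    rcases hrest : (c :: t).dropWhile (fun a => a != 'x') with _ | ⟨d, r2⟩
    -- case: no 'x' in the string
    · have hcs : (c :: t).takeWhile (fun a => a != 'x') = c :: t := by
        have := List.takeWhile_append_dropWhile (p := fun a => a != 'x') (l := c :: t)
        rw [hrest] at this; simpa using this
      have hsox : pvSox (c :: t) = [c :: t] := by rw [pvSox_eq_span, hrest, hcs]
      show _ = pvAltP (c :: t)
      rw [pvAltP, hsox]
      simp only [hcs]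
      simp only [List.getLast?_singleton, Option.some.injEq, beq_iff_eq]
      rw [if_neg (by simp)]
      rw [pvParseB]
      cases PySem.Int.ofChars? (c :: t) <;> simp [pvEqSplitA, pvParseB]
    -- case: an 'x' occurs; d = 'x'
    · have hd : d = 'x' := by
        have := pvHeadDrop _ _ _ _ hrest
        simpa using this
      subst hd
      have hlenr2 : r2.length < (c :: t).length := by
        have h1 : ((c :: t).dropWhile (fun a => a != 'x')).length ≤ (c :: t).length :=
          List.length_dropWhile_le _ _
        rw [hrest] at h1
        simpa using h1
      have hxr : List.takeWhile (fun a => a == 'x') r2 =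
          List.replicate (List.takeWhile (fun a => a == 'x') r2).length 'x' := by
        rw [List.eq_replicate_iff]
        refine ⟨rfl, fun b hb => ?_⟩
        have := List.mem_takeWhile_imp hb
        simpa using this
      rw [show List.takeWhile (fun a => a == 'x') ('x' :: r2)
            = 'x' :: List.takeWhile (fun a => a == 'x') r2 by
          simp,
          show List.dropWhile (fun a => a == 'x') ('x' :: r2)
            = List.dropWhile (fun a => a == 'x') r2 by
          simp]
      rw [hxr]
      obtain ⟨m, hm⟩ : ∃ m, (List.takeWhile (fun a => a == 'x') r2).length = m := ⟨_, rfl⟩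
      rw [hm] at hxr ⊢
      have hlenrr : (List.dropWhile (fun a => a == 'x') r2).length ≤ r2.length :=
        List.length_dropWhile_le _ _
      have hr2 : List.replicate m 'x' ++ List.dropWhile (fun a => a == 'x') r2 = r2 := by
        conv_rhs => rw [← List.takeWhile_append_dropWhile (p := fun a => a == 'x') (l := r2)]
        rw [hxr]
      generalize hrr : List.dropWhile (fun a => a == 'x') r2 = rr at hlenrr hr2 ⊢
      have hsox : pvSox (c :: t) =
          (c :: t).takeWhile (fun a => a != 'x') :: (List.replicate m ([] : List Char) ++ pvSox rr) := by
        rw [pvSox_eq_span, hrest]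
        dsimp only
        rw [← hr2, pvSox_replicate_append]
      show _ = pvAltP (c :: t)
      rw [pvAltP, hsox]
      have hSnn := pvSox_ne_nil rr
      have hlast : ((((c :: t).takeWhile (fun a => a != 'x')) ::
          (List.replicate m ([] : List Char) ++ pvSox rr)).getLast? == some []) =
          ((pvSox rr).getLast? == some []) := by
        rcases hs2 : pvSox rr with _ | ⟨p, ps⟩
        · exact absurd hs2 hSnn
        · rw [show ((c :: t).takeWhile (fun a => a != 'x')) ::
              (List.replicate m ([] : List Char) ++ (p :: ps)) =
              (((c :: t).takeWhile (fun a => a != 'x')) :: List.replicate m ([] : List Char))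
                ++ (p :: ps) by simp]
          rw [List.getLast?_append]
          cases hg : (p :: ps).getLast? with
          | none => simp at hg
          | some q => simp
      simp only [hlast]
      cases rr with
      -- rr = [] : the string ends in the x-run
      | nil =>
        rw [show pvSox [] = [[]] by simp [pvSox]]
        rw [if_pos (by simp)]
        have hdl : (((c :: t).takeWhile (fun a => a != 'x')) ::
            (List.replicate m ([] : List Char) ++ [[]])).dropLast =
            ((c :: t).takeWhile (fun a => a != 'x')) :: List.replicate m ([] : List Char) := by
          rw [show ((c :: t).takeWhile (fun a => a != 'x')) ::
              (List.replicate m ([] : List Char) ++ [[]]) =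
              (((c :: t).takeWhile (fun a => a != 'x')) :: List.replicate m ([] : List Char))
                ++ [[]] by simp]
          exact List.dropLast_concat ..
        rw [hdl, pvParseB.eq_def]
        dsimp only
        cases PySem.Int.ofChars? ((c :: t).takeWhile (fun a => a != 'x')) with
        | none => rfl
        | some coeff =>
          simp [pvEqSplitA, pvParseB]
      -- rr = e :: t2 : a further coefficient follows
      | cons e t2 =>
        have he : (e == 'x') = false := pvHeadDrop (fun a => a == 'x') r2 t2 e hrr
        have he' : ¬ e = 'x' := by simpa using he
        have hh0 : ∃ h0 Stail, pvSox (e :: t2) = h0 :: Stail ∧ h0 ≠ [] := by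
          rw [pvSox_eq_span]
          rcases hdd : (e :: t2).dropWhile (fun a => a != 'x') with _ | ⟨g, g2⟩
          · exact ⟨_, [], rfl, by simp [he']⟩
          · exact ⟨_, _, rfl, by simp [he']⟩
        obtain ⟨h0, Stail, hSeq, hh0ne⟩ := hh0
        have hX : ∃ X', (if ((pvSox (e :: t2)).getLast? == some []) = true
            then (pvSox (e :: t2)).dropLast else pvSox (e :: t2)) = h0 :: X' := by
          by_cases htr2 : ((pvSox (e :: t2)).getLast? == some []) = true
          · rw [if_pos htr2]
            rcases hst : Stail with _ | ⟨u, us⟩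
            · exfalso
              rw [hSeq, hst] at htr2
              simp at htr2
              exact hh0ne htr2
            · rw [hSeq, hst]
              exact ⟨_, rfl⟩
          · rw [if_neg htr2, hSeq]
            exact ⟨_, rfl⟩
        obtain ⟨X', hXeq⟩ := hX
        have hmain : (if ((pvSox (e :: t2)).getLast? == some []) = true then
              ((((c :: t).takeWhile (fun a => a != 'x')) ::
                (List.replicate m ([] : List Char) ++ pvSox (e :: t2)))).dropLast
            else (((c :: t).takeWhile (fun a => a != 'x')) ::
                (List.replicate m ([] : List Char) ++ pvSox (e :: t2)))) =
            ((c :: t).takeWhile (fun a => a != 'x')) ::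
              (List.replicate m ([] : List Char) ++ (h0 :: X')) := by
        -- dropLast passes the head and the replicate block when the last piece list is non-empty
          by_cases htr2 : ((pvSox (e :: t2)).getLast? == some []) = true
          · rw [if_pos htr2]
            rw [show (((c :: t).takeWhile (fun a => a != 'x')) ::
                (List.replicate m ([] : List Char) ++ pvSox (e :: t2))) =
                ((((c :: t).takeWhile (fun a => a != 'x')) :: List.replicate m ([] : List Char))
                  ++ pvSox (e :: t2)) by simp]
            rw [List.dropLast_append_of_ne_nil (pvSox_ne_nil _)]
            rw [← hXeq, if_pos htr2]
            simp
          · rw [if_neg htr2, ← hXeq, if_neg htr2]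
        rw [hmain, pvParseB.eq_def]
        dsimp only
        cases PySem.Int.ofChars? ((c :: t).takeWhile (fun a => a != 'x')) with
        | none => rfl
        | some coeff =>
          have hemp : (List.replicate m ([] : List Char) ++ (h0 :: X')).takeWhile
              (fun u => u == ([] : List Char)) = List.replicate m ([] : List Char) := by
            rw [List.takeWhile_append]
            simp only [List.takeWhile_replicate, beq_self_eq_true, if_true,
              List.length_replicate]
            rw [List.takeWhile_cons]
            rw [if_neg (by simp [hh0ne])]
            simp
          have hdw : (List.replicate m ([] : List Char) ++ (h0 :: X')).dropWhile
              (fun u => u == ([] : List Char)) = h0 :: X' := by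
            rw [List.dropWhile_append]
            simp only [List.dropWhile_replicate, beq_self_eq_true, if_true, List.isEmpty_nil]
            rw [List.dropWhile_cons]
            rw [if_neg (by simp [hh0ne])]
          rw [hemp, hdw]
          have hrec : pvEqSplitA (e :: t2) = pvAltP (e :: t2) := pvParse_eq (e :: t2)
          rw [hrec, pvAltP]
          dsimp only
          rw [hXeq]
          simp
  termination_by l => l.length
  decreasing_by
    simp only [List.length_cons] at *
    omega

def pvPieceBody (t : Int × Nat) : List Char :=
  let c := PySem.Int.floordiv t.1 ((t.2 : Int) + 1)
  (if |c| ≠ 1 then PySem.Int.toChars c else if c = -1 then ['-'] else []) ++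
    List.replicate (t.2 + 1) 'x'

def pvPieceRest (t : Int × Nat) : List Char :=
  (if 0 ≤ PySem.Int.floordiv t.1 ((t.2 : Int) + 1) then ['+'] else []) ++ pvPieceBody t

def pvFmt : List (Int × Nat) → List Char
  | [] => []
  | t :: ts => pvPieceBody t ++ ts.flatMap pvPieceRest

theorem pvGetNegOne (a : List Char) : PySem.List.pyGet? (a ++ ['x']) (-1) = some 'x' := by
  simp [PySem.List.pyGet?, PySem.List.pyIdx?]

theorem pvStepA_nil (t : Int × Nat) : pvStepA [] t = pvPieceBody t := by
  simp [pvStepA, pvPieceBody, PySem.List.pyGet?, PySem.List.pyIdx?]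

theorem pvStepA_endx (a : List Char) (t : Int × Nat) :
    pvStepA (a ++ ['x']) t = (a ++ ['x']) ++ pvPieceRest t := by
  unfold pvStepA pvPieceRest pvPieceBody
  dsimp only
  rw [pvGetNegOne]
  simp only [beq_self_eq_true, Bool.true_and, decide_eq_true_eq]
  split_ifs <;> simp

theorem pvPieceBody_endx (t : Int × Nat) : ∃ a, pvPieceBody t = a ++ ['x'] := by
  unfold pvPieceBody
  dsimp only
  refine ⟨(if |PySem.Int.floordiv t.1 ((t.2 : Int) + 1)| ≠ 1 then
      PySem.Int.toChars (PySem.Int.floordiv t.1 ((t.2 : Int) + 1))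
    else if PySem.Int.floordiv t.1 ((t.2 : Int) + 1) = -1 then ['-'] else []) ++
      List.replicate t.2 'x', ?_⟩
  rw [List.append_assoc, ← List.replicate_succ' (n := t.2)]

theorem pvPieceRest_endx (t : Int × Nat) : ∃ a, pvPieceRest t = a ++ ['x'] := by
  obtain ⟨a, ha⟩ := pvPieceBody_endx t
  exact ⟨_, by rw [pvPieceRest, ha, ← List.append_assoc]⟩

theorem pvFoldA_go (ts : List (Int × Nat)) : ∀ (a : List Char),
    ts.foldl pvStepA (a ++ ['x']) = (a ++ ['x']) ++ ts.flatMap pvPieceRest := by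
  induction ts with
  | nil => intro a; simp
  | cons t ts ih =>
    intro a
    rw [List.foldl_cons, pvStepA_endx]
    obtain ⟨b, hb⟩ := pvPieceRest_endx t
    rw [hb, ← List.append_assoc (a ++ ['x']) b ['x'], ih]
    simp [hb]

theorem pvFoldA_eq (terms : List (Int × Nat)) : terms.foldl pvStepA [] = pvFmt terms := by
  cases terms with
  | nil => rfl
  | cons t ts =>
    rw [List.foldl_cons, pvStepA_nil, pvFmt]
    obtain ⟨a, ha⟩ := pvPieceBody_endx t
    rw [ha, pvFoldA_go]

theorem pvStepB_pos (parts : List (List Char)) (k : Nat) (hk : k ≠ 0) (t : Int × Nat) :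
    pvStepB (parts, k) t =
      (parts ++ (((if 0 ≤ PySem.Int.floordiv t.1 ((t.2 : Int) + 1) then [['+']] else []) ++
        ((if |PySem.Int.floordiv t.1 ((t.2 : Int) + 1)| ≠ 1 then
            [PySem.Int.toChars (PySem.Int.floordiv t.1 ((t.2 : Int) + 1))]
          else if PySem.Int.floordiv t.1 ((t.2 : Int) + 1) = -1 then [['-']] else []) ++
          [List.replicate (t.2 + 1) 'x']))), k + 1) := by
  unfold pvStepB
  dsimp only
  simp only [ne_eq, hk, not_false_eq_true, decide_true, Bool.true_and, decide_eq_true_eq]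
  split_ifs <;> simp

theorem pvFlattenPiece (t : Int × Nat) :
    ((if 0 ≤ PySem.Int.floordiv t.1 ((t.2 : Int) + 1) then [['+']] else []) ++
        ((if |PySem.Int.floordiv t.1 ((t.2 : Int) + 1)| ≠ 1 then
            [PySem.Int.toChars (PySem.Int.floordiv t.1 ((t.2 : Int) + 1))]
          else if PySem.Int.floordiv t.1 ((t.2 : Int) + 1) = -1 then [['-']] else []) ++
          [List.replicate (t.2 + 1) 'x'])).flatten = pvPieceRest t := by
  rw [pvPieceRest, pvPieceBody]
  split_ifs <;> simp

theorem pvFoldB_go (ts : List (Int × Nat)) : ∀ (parts : List (List Char)) (k : Nat), k ≠ 0 →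
    ((ts.foldl pvStepB (parts, k)).1).flatten = parts.flatten ++ ts.flatMap pvPieceRest := by
  induction ts with
  | nil => intro parts k _; simp
  | cons t ts ih =>
    intro parts k hk
    rw [List.foldl_cons, pvStepB_pos parts k hk t, ih _ _ (by omega)]
    rw [List.flatMap_cons, List.flatten_append, pvFlattenPiece]
    simp

theorem pvFoldB_eq (terms : List (Int × Nat)) :
    ((terms.foldl pvStepB ([], 0)).1).flatten = pvFmt terms := by
  cases terms with
  | nil => rfl
  | cons t ts =>
    rw [List.foldl_cons]
    have hstep : pvStepB ([], 0) t =
        ((if |PySem.Int.floordiv t.1 ((t.2 : Int) + 1)| ≠ 1 then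
            [PySem.Int.toChars (PySem.Int.floordiv t.1 ((t.2 : Int) + 1))]
          else if PySem.Int.floordiv t.1 ((t.2 : Int) + 1) = -1 then [['-']] else []) ++
          [List.replicate (t.2 + 1) 'x'], 1) := by
      unfold pvStepB
      dsimp only
      rw [show (decide ((0:Nat) ≠ 0) &&
            decide (0 ≤ PySem.Int.floordiv t.1 ((t.2 : Int) + 1))) = false by simp]
      simp only [Bool.false_eq_true, if_false]
      split_ifs <;> simp
    rw [hstep, pvFoldB_go _ _ _ (by omega), pvFmt]
    congr 1
    rw [pvPieceBody]
    split_ifs <;> simp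

theorem pvJoinNil (ps : List (List Char)) : PySem.Chars.join [] ps = ps.flatten := by
  induction ps with
  | nil => rfl
  | cons p q ih =>
    cases q with
    | nil => simp [PySem.Chars.join, List.intercalate]
    | cons r s =>
      simp [PySem.Chars.join, List.intercalate, List.intersperse] at ih ⊢
      simpa using ih

theorem pvMainEq (eq : String) : my_integral eq = my_integral_alt eq := by
  unfold my_integral my_integral_alt
  by_cases h : (eq == "0") = true
  · rw [if_pos h, if_pos h]
  · rw [if_neg h, if_neg h]
    dsimp only
    rw [pvSplitOn_eq_sox]
    have hp := pvParse_eq eq.toList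
    rw [pvAltP] at hp
    rw [← hp]
    cases pvEqSplitA eq.toList with
    | none => rfl
    | some terms =>
      dsimp only
      rw [pvJoinNil, List.flatten_append, pvFoldB_eq, ← pvFoldA_eq]
      simp

-- ===== VERDICT (by name: the statement is the Claim_ definition above) =====
theorem my_integral_spec : Claim_equal_my_integral := by
  intro eq _ _
  unfold Spec_my_integral
  exact pvMainEq eq
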